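-- pv_equiv track=rewrite | github.com/MrBrantCode/unitest_baseline | mut_generate/mist_train_cf/cf_61130/solution.py | choose_num
-- ===== SOURCE A (Python) =====
-- def choose_num(x, y, z, n):
--     # Initialize an empty list to store the even numbers divisible by z
--     chosen_num_list = []
--
--     # If y is less than x, switch their values. This ensures x is the start of the range and y is the end.
--     if y < x:
--         x, y = y, x
--
--     # Scan every number in the range [x, y]
--     for num in range(x, y+1):
--         # If num is even and divisible by z, add it to the list
--         if num % 2 == 0 and num % z == 0:
--             chosen_num_list.append(num)
--
--     # Sort the list in descending order to get the nth largest number at index n-1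
--     chosen_num_list.sort(reverse=True)
--
--     # If the length of the list is less than n (no nth largest number), return -1
--     if len(chosen_num_list) < n:
--         return -1
--     else:
--         return chosen_num_list[n-1]
-- ===== SOURCE B (Python) =====
-- def choose_num(x, y, z, n):
--     # O(1) arithmetic-progression form: even multiples of z in [min,max] are the
--     # multiples of step = lcm(2, |z|); count them and index directly.
--     lo, hi = (x, y) if x <= y else (y, x)
--     step = abs(z) if z % 2 == 0 else 2 * abs(z)
--     count = hi // step - (lo - 1) // step
--     if 1 <= n <= count:
--         return (hi // step - (n - 1)) * step
--     return -1
-- ===== Notes on version B (the rewrite author's own statement) =====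
-- stated objective: faster
-- what changed: Replaces the O(y-x) scan-filter-sort over range(x,y+1) by O(1) arithmetic on the progression of multiples of step = lcm(2,|z|): count = hi//step - (lo-1)//step and the nth largest is (hi//step - (n-1))*step.
-- intended difference: For n <= 0 (where A's list is long enough that list[n-1] wraps around), A returns the (1-n)-th SMALLEST even multiple via Python's negative-index wraparound; B returns -1, the intended 'no nth largest' answer, since an nth-largest query with n <= 0 has no meaning. — e.g. on choose_num(1, 10, 2, 0): A returns 2, B returns -1
-- outside the precondition, e.g. on choose_num(-7, -7, 0, 1): A returns -1, B raises ZeroDivisionError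
import Mathlib
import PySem

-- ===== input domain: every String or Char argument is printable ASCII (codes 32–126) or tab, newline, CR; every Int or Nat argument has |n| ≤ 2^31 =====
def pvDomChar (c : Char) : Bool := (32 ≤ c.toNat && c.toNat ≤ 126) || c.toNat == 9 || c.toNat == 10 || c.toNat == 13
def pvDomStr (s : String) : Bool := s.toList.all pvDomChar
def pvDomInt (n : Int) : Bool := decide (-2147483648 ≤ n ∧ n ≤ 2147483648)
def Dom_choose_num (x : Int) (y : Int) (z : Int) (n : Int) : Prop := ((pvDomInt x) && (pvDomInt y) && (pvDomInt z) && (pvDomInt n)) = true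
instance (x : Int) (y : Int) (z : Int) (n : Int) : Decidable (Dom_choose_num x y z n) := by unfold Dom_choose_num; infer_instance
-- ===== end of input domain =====

-- B replaces A's O(y-x) scan+sort by O(1) arithmetic on the progression of multiples of lcm(2,|z|).

-- ===== PORT A =====
def choose_num (x : Int) (y : Int) (z : Int) (n : Int) : Int :=
  -- if y < x: x, y = y, x
  let p := if y < x then (y, x) else (x, y)
  -- for num in range(x, y+1): if num % 2 == 0 and num % z == 0: append
  let lst := (PySem.List.pyRange p.1 (p.2 + 1) 1).foldl
      (fun acc num =>
        if PySem.Int.mod num 2 == 0 && PySem.Int.mod num z == 0 then acc ++ [num] else acc) []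
  -- chosen_num_list.sort(reverse=True)
  let srt := PySem.List.sorted lst (fun v => v) true
  if (srt.length : Int) < n then -1 else PySem.List.pyGetD srt (n - 1) 0

-- ===== PORT B =====
def choose_num_alt (x : Int) (y : Int) (z : Int) (n : Int) : Int :=
  let lo := if x ≤ y then x else y
  let hi := if x ≤ y then y else x
  let step : Int := if PySem.Int.mod z 2 == 0 then |z| else 2 * |z|
  let count := PySem.Int.floordiv hi step - PySem.Int.floordiv (lo - 1) step
  if 1 ≤ n ∧ n ≤ count then (PySem.Int.floordiv hi step - (n - 1)) * step else -1

-- ===== PRECONDITION & SPEC =====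
-- Pre_ excludes exactly the inputs where A raises: z = 0 whenever the range [min,max]
-- contains an even number (ZeroDivisionError; when it contains none — a single odd
-- number — A returns -1 but B's division by lcm(2,z) raises, so z = 0 is excluded
-- outright), and n ≤ 0 with fewer than 1-n hits, where A's list[n-1] raises IndexError.
def Pre_choose_num (x : Int) (y : Int) (z : Int) (n : Int) : Prop :=
  z ≠ 0 ∧
  (1 ≤ n ∨
    1 ≤ PySem.Int.floordiv (max x y) (if PySem.Int.mod z 2 == 0 then |z| else 2 * |z|)
        - PySem.Int.floordiv (min x y - 1) (if PySem.Int.mod z 2 == 0 then |z| else 2 * |z|)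
        + n)
instance (x : Int) (y : Int) (z : Int) (n : Int) : Decidable (Pre_choose_num x y z n) := by unfold Pre_choose_num; infer_instance
def pvWitness_choose_num : Int × Int × Int × Int := (1, 10, 2, 1)

-- For n ≤ 0 (where A's list is long enough that list[n-1] wraps around), A returns the
-- (1-n)-th SMALLEST even multiple via Python's negative-index wraparound; B returns -1,
-- the intended 'no nth largest' answer, since an nth-largest query with n ≤ 0 is meaningless.
def D_choose_num (x : Int) (y : Int) (z : Int) (n : Int) : Prop := n ≤ 0
instance (x : Int) (y : Int) (z : Int) (n : Int) : Decidable (D_choose_num x y z n) := by unfold D_choose_num; infer_instance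

def Spec_choose_num (x : Int) (y : Int) (z : Int) (n : Int) (out : Int) : Prop :=
  ¬ D_choose_num x y z n → out = choose_num_alt x y z n
instance (x : Int) (y : Int) (z : Int) (n : Int) (out : Int) : Decidable (Spec_choose_num x y z n out) := by unfold Spec_choose_num; infer_instance

def pvDiffWitness_choose_num : Int × Int × Int × Int := (1, 10, 2, 0)
def pvDiffWitnessOut_choose_num : Int × Int := (2, -1)

-- ===== CLAIM (what is proved, stated in full; the proofs are below) =====
def Claim_unchanged_choose_num : Prop := ∀ (x : Int) (y : Int) (z : Int) (n : Int), Dom_choose_num x y z n → Pre_choose_num x y z n → Spec_choose_num x y z n (choose_num x y z n)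
def Claim_changed_choose_num : Prop := Dom_choose_num (pvDiffWitness_choose_num.1) (pvDiffWitness_choose_num.2.1) (pvDiffWitness_choose_num.2.2.1) (pvDiffWitness_choose_num.2.2.2) ∧ Pre_choose_num (pvDiffWitness_choose_num.1) (pvDiffWitness_choose_num.2.1) (pvDiffWitness_choose_num.2.2.1) (pvDiffWitness_choose_num.2.2.2) ∧ D_choose_num (pvDiffWitness_choose_num.1) (pvDiffWitness_choose_num.2.1) (pvDiffWitness_choose_num.2.2.1) (pvDiffWitness_choose_num.2.2.2) ∧ choose_num (pvDiffWitness_choose_num.1) (pvDiffWitness_choose_num.2.1) (pvDiffWitness_choose_num.2.2.1) (pvDiffWitness_choose_num.2.2.2) = pvDiffWitnessOut_choose_num.1 ∧ choose_num_alt (pvDiffWitness_choose_num.1) (pvDiffWitness_choose_num.2.1) (pvDiffWitness_choose_num.2.2.1) (pvDiffWitness_choose_num.2.2.2) = pvDiffWitnessOut_choose_num.2 ∧ pvDiffWitnessOut_choose_num.1 ≠ pvDiffWitnessOut_choose_num.2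
def Claim_exact_choose_num : Prop := ∀ (x : Int) (y : Int) (z : Int) (n : Int), Dom_choose_num x y z n → Pre_choose_num x y z n → D_choose_num x y z n → choose_num x y z n ≠ choose_num_alt x y z n

-- ===== LEMMAS AND PROOFS =====

theorem pvFd_bounds (a L : Int) (h : 0 < L) :
    PySem.Int.floordiv a L * L ≤ a ∧ a < (PySem.Int.floordiv a L + 1) * L :=
  (PySem.Int.floordiv_eq_iff_of_pos h).mp rfl

theorem pvFd_mono (a b L : Int) (hab : a ≤ b) (h : 0 < L) :
    PySem.Int.floordiv a L ≤ PySem.Int.floordiv b L := by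
  rw [PySem.Int.le_floordiv_iff_mul_le h]
  exact le_trans (pvFd_bounds a L h).1 hab

theorem pvFd_pred (t L : Int) (h : 0 < L) :
    PySem.Int.floordiv (t-1) L = if L ∣ t then PySem.Int.floordiv t L - 1 else PySem.Int.floordiv t L := by
  obtain ⟨h1, h2⟩ := pvFd_bounds t L h
  split_ifs with hd
  · rw [PySem.Int.floordiv_eq_iff_of_pos h]
    obtain ⟨k, hk⟩ := hd
    have hq : PySem.Int.floordiv t L = k := by
      rw [PySem.Int.floordiv_eq_iff_of_pos h]; subst hk; constructor <;> nlinarith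
    rw [hq]; subst hk; constructor <;> nlinarith
  · rw [PySem.Int.floordiv_eq_iff_of_pos h]
    have hne : t ≠ PySem.Int.floordiv t L * L := fun he => hd ⟨PySem.Int.floordiv t L, he.trans (mul_comm _ _)⟩
    have hlt : PySem.Int.floordiv t L * L < t := lt_of_le_of_ne h1 (fun he => hne he.symm)
    exact ⟨by linarith [Int.add_one_le_iff.mpr hlt], by linarith⟩

theorem pvFd_mul (k L : Int) (h : 0 < L) : PySem.Int.floordiv (k * L) L = k := by
  rw [PySem.Int.floordiv_eq_iff_of_pos h]; constructor <;> nlinarith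

theorem pvFilter_range (L : Int) (h : 0 < L) (a : Int) : ∀ (k : Nat) (b : Int), (b - a).toNat = k →
    (PySem.List.pyRange a b 1).filter (fun v => decide (L ∣ v))
      = (PySem.List.pyRange (PySem.Int.floordiv (a-1) L + 1) (PySem.Int.floordiv (b-1) L + 1) 1).map (fun q => q * L) := by
  intro k
  induction k with
  | zero =>
    intro b hb
    rw [PySem.List.pyRange_one_eq_nil (by omega), PySem.List.pyRange_one_eq_nil (by
      have := pvFd_mono (b-1) (a-1) L (by omega) h; omega)]
    rfl
  | succ k ih =>
    intro b hb
    have hab : a < b := by omega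
    have hb1 : b = (b-1) + 1 := by ring
    rw [hb1, PySem.List.pyRange_one_succ_right (by omega), List.filter_append,
        ih (b-1) (by omega)]
    have hones : (b - 1 + 1 - 1) = b - 1 := by ring
    rw [hones]
    have hp := pvFd_pred (b-1) L h
    by_cases hd : L ∣ (b-1)
    · rw [if_pos hd] at hp
      have hfc : PySem.Int.floordiv (b-1) L * L = b - 1 := by
        obtain ⟨c, hc⟩ := hd
        rw [hc, mul_comm L c, pvFd_mul c L h]
      have hmono := pvFd_mono (a-1) (b-1-1) L (by omega) h
      have hs : PySem.Int.floordiv (a-1) L + 1 ≤ PySem.Int.floordiv (b-1) L := by omega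
      have he : PySem.Int.floordiv (b-1-1) L + 1 = PySem.Int.floordiv (b-1) L := by omega
      rw [he, PySem.List.pyRange_one_succ_right hs, List.map_append]
      have hdec : decide (L ∣ (b-1)) = true := decide_eq_true hd
      simp only [List.filter_cons, hdec, List.filter_nil, List.map_cons, List.map_nil, if_true, hfc]
    · rw [if_neg hd] at hp
      have hdec : decide (L ∣ (b-1)) = false := decide_eq_false hd
      simp only [List.filter_cons, hdec, List.filter_nil, Bool.false_eq_true, if_false,
        List.append_nil, hp]

theorem pvCond (z v : Int) (hz : z ≠ 0) :
    (PySem.Int.mod v 2 == 0 && PySem.Int.mod v z == 0)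
      = decide ((if PySem.Int.mod z 2 == 0 then |z| else 2 * |z|) ∣ v) := by
  by_cases h2z : (2:Int) ∣ z
  · have hc : (PySem.Int.mod z 2 == 0) = true := by
      simp [PySem.Int.mod_eq_zero_iff_dvd, h2z]
    rw [Bool.eq_iff_iff]
    simp only [hc, if_true, Bool.and_eq_true, beq_iff_eq, decide_eq_true_eq,
      PySem.Int.mod_eq_zero_iff_dvd]
    constructor
    · rintro ⟨-, hzv⟩; exact (abs_dvd _ _).mpr hzv
    · intro h
      have hzv : z ∣ v := (abs_dvd _ _).mp h
      exact ⟨dvd_trans h2z hzv, hzv⟩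
  · have hc : (PySem.Int.mod z 2 == 0) = false := by
      simp [PySem.Int.mod_eq_zero_iff_dvd, h2z]
    have hcop : IsCoprime (2:Int) z := by
      rw [Int.isCoprime_iff_gcd_eq_one]
      have hna : ¬ (2 ∣ z.natAbs) := by
        intro hd
        exact h2z (by simpa using Int.natAbs_dvd_natAbs.mp (by simpa using hd))
      have hm : z.natAbs % 2 = 1 := by omega
      have hg : Int.gcd 2 z = Nat.gcd 2 z.natAbs := rfl
      rw [hg, Nat.gcd_rec]
      simp [hm]
    rw [Bool.eq_iff_iff]
    simp only [hc, Bool.false_eq_true, if_false, Bool.and_eq_true, beq_iff_eq,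
      decide_eq_true_eq, PySem.Int.mod_eq_zero_iff_dvd]
    constructor
    · rintro ⟨h2v, hzv⟩
      have hm : 2 * z ∣ v := hcop.mul_dvd h2v hzv
      have habs : |2 * z| ∣ v := (abs_dvd _ _).mpr hm
      rwa [abs_mul, abs_two] at habs
    · intro h
      refine ⟨dvd_trans (dvd_mul_right 2 |z|) h, ?_⟩
      exact (abs_dvd _ _).mp (dvd_trans (dvd_mul_left _ _) h)

theorem pvSortedRev (L a b : Int) (hL : 0 < L) :
    PySem.List.sorted ((PySem.List.pyRange a b 1).map (fun q => q * L)) (fun v => v) true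
      = ((PySem.List.pyRange a b 1).map (fun q => q * L)).reverse := by
  apply PySem.List.sorted_rev_eq_of_perm_of_pairwise_gt _ _ (fun v => v)
  · exact List.reverse_perm _
  · rw [List.pairwise_reverse]
    refine List.Pairwise.map _ ?_ (PySem.List.pairwise_lt_pyRange_one a b)
    intro p q hpq
    exact mul_lt_mul_of_pos_right hpq hL

theorem pvLpos (z : Int) (hz : z ≠ 0) : 0 < (if PySem.Int.mod z 2 == 0 then |z| else 2 * |z|) := by
  have : 0 < |z| := abs_pos.mpr hz
  split_ifs <;> omega

theorem pvSrt (lo hi z : Int) (hz : z ≠ 0) :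
    PySem.List.sorted
      ((PySem.List.pyRange lo (hi+1) 1).foldl
        (fun acc num => if PySem.Int.mod num 2 == 0 && PySem.Int.mod num z == 0 then acc ++ [num] else acc) [])
      (fun v => v) true
    = ((PySem.List.pyRange
          (PySem.Int.floordiv (lo-1) (if PySem.Int.mod z 2 == 0 then |z| else 2 * |z|) + 1)
          (PySem.Int.floordiv hi (if PySem.Int.mod z 2 == 0 then |z| else 2 * |z|) + 1) 1).map
        (fun q => q * (if PySem.Int.mod z 2 == 0 then |z| else 2 * |z|))).reverse := by
  have hL := pvLpos z hz
  rw [PySem.List.foldl_append_if_eq_filter _ _ [], List.nil_append]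
  rw [List.filter_congr (fun v _ => pvCond z v hz)]
  rw [pvFilter_range _ hL lo ((hi + 1) - lo).toNat (hi+1) rfl]
  have h1 : (hi + 1 - 1) = hi := by ring
  rw [h1, pvSortedRev _ _ _ hL]

theorem pvLeven (z : Int) : 2 ∣ (if PySem.Int.mod z 2 == 0 then |z| else 2 * |z|) := by
  by_cases h2z : (2:Int) ∣ z
  · have hc : (PySem.Int.mod z 2 == 0) = true := by
      simp [PySem.Int.mod_eq_zero_iff_dvd, h2z]
    simp only [hc, if_true]
    exact (dvd_abs 2 z).mpr h2z
  · have hc : (PySem.Int.mod z 2 == 0) = false := by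
      simp [PySem.Int.mod_eq_zero_iff_dvd, h2z]
    rw [hc]
    simp only [Bool.false_eq_true, if_false]
    exact dvd_mul_right 2 |z|

theorem pvFinal (lo hi z n : Int) (hz : z ≠ 0) (hlohi : lo ≤ hi) (hn : 1 ≤ n) :
    (if ((PySem.List.sorted
            ((PySem.List.pyRange lo (hi+1) 1).foldl
              (fun acc num => if PySem.Int.mod num 2 == 0 && PySem.Int.mod num z == 0 then acc ++ [num] else acc) [])
            (fun v => v) true).length : Int) < n then -1
     else PySem.List.pyGetD
            (PySem.List.sorted
              ((PySem.List.pyRange lo (hi+1) 1).foldl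
                (fun acc num => if PySem.Int.mod num 2 == 0 && PySem.Int.mod num z == 0 then acc ++ [num] else acc) [])
              (fun v => v) true) (n-1) 0)
    = (if 1 ≤ n ∧ n ≤ PySem.Int.floordiv hi (if PySem.Int.mod z 2 == 0 then |z| else 2 * |z|)
                      - PySem.Int.floordiv (lo-1) (if PySem.Int.mod z 2 == 0 then |z| else 2 * |z|)
       then (PySem.Int.floordiv hi (if PySem.Int.mod z 2 == 0 then |z| else 2 * |z|) - (n-1))
              * (if PySem.Int.mod z 2 == 0 then |z| else 2 * |z|)
       else -1) := by
  have hL := pvLpos z hz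
  rw [pvSrt lo hi z hz]
  set L := if PySem.Int.mod z 2 == 0 then |z| else 2 * |z| with hLdef
  set q0 := PySem.Int.floordiv (lo-1) L + 1 with hq0
  set q1 := PySem.Int.floordiv hi L + 1 with hq1
  have hq : q0 ≤ q1 := by
    have := pvFd_mono (lo-1) hi L (by omega) hL; omega
  have hlen : (((PySem.List.pyRange q0 q1 1).map (fun q => q * L)).reverse.length : Int) = q1 - q0 := by
    rw [List.length_reverse, List.length_map, PySem.List.length_pyRange_one]; omega
  by_cases hc : q1 - q0 < n
  · rw [if_pos (by omega), if_neg (by omega)]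
  · rw [if_neg (by omega), if_pos ⟨hn, by omega⟩]
    have h0 : (0:Int) ≤ n - 1 := by omega
    have h2 : n - 1 < ((((PySem.List.pyRange q0 q1 1).map (fun q => q * L)).reverse.length : Nat) : Int) := by
      omega
    rw [PySem.List.pyGetD_eq_getElem _ 0 h0 h2]
    have hkk : (n-1).toNat < ((PySem.List.pyRange q0 q1 1).map (fun q => q * L)).reverse.length := by omega
    rw [List.getElem_reverse, List.getElem_map, PySem.List.getElem_pyRange_one]
    have hll : ((PySem.List.pyRange q0 q1 1).map (fun q => q * L)).length = (q1 - q0).toNat := by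
      rw [List.length_map, PySem.List.length_pyRange_one]
    congr 1
    have hcast : (((q1 - q0).toNat - 1 - (n-1).toNat : Nat) : Int) = q1 - q0 - n := by omega
    rw [hll] at *
    push_cast [hcast]
    omega

theorem pvMemEven (lo hi z n v : Int) (hz : z ≠ 0)
    (hmem : v ∈ ((PySem.List.pyRange (PySem.Int.floordiv (lo-1) (if PySem.Int.mod z 2 == 0 then |z| else 2 * |z|) + 1)
          (PySem.Int.floordiv hi (if PySem.Int.mod z 2 == 0 then |z| else 2 * |z|) + 1) 1).map
        (fun q => q * (if PySem.Int.mod z 2 == 0 then |z| else 2 * |z|))).reverse) : v ≠ -1 := by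
  rw [List.mem_reverse, List.mem_map] at hmem
  obtain ⟨q, -, rfl⟩ := hmem
  obtain ⟨w, hw⟩ := pvLeven z
  intro hbad
  have hdvd : (2:Int) ∣ q * (if PySem.Int.mod z 2 == 0 then |z| else 2 * |z|) := by
    rw [hw]; exact ⟨q * w, by ring⟩
  rw [hbad] at hdvd
  omega

-- ===== VERDICT (by name: the statement is the Claim_ definition above) =====
theorem choose_num_spec : Claim_unchanged_choose_num := by
  intro x y z n _ hpre
  intro hnd
  unfold D_choose_num at hnd
  have hn : 1 ≤ n := by omega
  obtain ⟨hz, -⟩ := hpre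
  simp only [choose_num, choose_num_alt]
  by_cases hxy : y < x
  · simp only [if_pos hxy, if_neg (show ¬ x ≤ y by omega)]
    exact pvFinal y x z n hz (by omega) hn
  · simp only [if_neg hxy, if_pos (show x ≤ y by omega)]
    exact pvFinal x y z n hz (by omega) hn
theorem choose_num_changed : Claim_changed_choose_num := by
  unfold Claim_changed_choose_num; decide
theorem choose_num_tight : Claim_exact_choose_num := by
  intro x y z n _ hpre hD
  unfold D_choose_num at hD
  obtain ⟨hz, hp2⟩ := hpre
  rcases hp2 with hn1 | hcnt
  · omega
  have hL := pvLpos z hz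
  have hB : choose_num_alt x y z n = -1 := by
    simp only [choose_num_alt]
    rw [if_neg]
    rintro ⟨h1, -⟩; omega
  rw [hB]
  simp only [choose_num]
  by_cases hxy : y < x
  · simp only [if_pos hxy]
    rw [max_eq_left (le_of_lt hxy), min_eq_right (le_of_lt hxy)] at hcnt
    rw [pvSrt y x z hz]
    have hm := pvFd_mono (y-1) x (if PySem.Int.mod z 2 == 0 then |z| else 2 * |z|) (by omega) hL
    rw [if_neg (by
      rw [List.length_reverse, List.length_map, PySem.List.length_pyRange_one]
      omega)]
    refine pvMemEven y x z n _ hz (PySem.List.pyGetD_mem _ 0 ?_)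
    unfold PySem.Raise.InRange
    rw [List.length_reverse, List.length_map, PySem.List.length_pyRange_one]
    omega
  · simp only [if_neg hxy]
    rw [max_eq_right (by omega : x ≤ y), min_eq_left (by omega : x ≤ y)] at hcnt
    rw [pvSrt x y z hz]
    have hm := pvFd_mono (x-1) y (if PySem.Int.mod z 2 == 0 then |z| else 2 * |z|) (by omega) hL
    rw [if_neg (by
      rw [List.length_reverse, List.length_map, PySem.List.length_pyRange_one]
      omega)]
    refine pvMemEven x y z n _ hz (PySem.List.pyGetD_mem _ 0 ?_)
    unfold PySem.Raise.InRange
    rw [List.length_reverse, List.length_map, PySem.List.length_pyRange_one]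
    omega
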